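-- pv_equiv track=rewrite | github.com/tahir24434/py-ds-algo | CodingInterviewProblems/DynamicProgramming/max_length_snake_sequence.py | _max_snake_seq
-- ===== SOURCE A (Python) =====
-- def _max_snake_seq(A, m, n, memo):
--     if m == 0 and n == 0:
--         return 1
--     if m < 0 or n < 0:
--         return 0
--
--     key = (m, n)
--     if key not in memo:
--         add_bottom = add_right = 0
--         if m-1 > 0 and A[m][n] == (A[m-1][n] + 1) or A[m][n] == (A[m-1][n] - 1):
--             add_bottom = 1
--         if n-1 > 0 and A[m][n] == A[m][n-1] + 1 or A[m][n] == A[m][n-1] - 1: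
--             add_right = 1
--
--         memo[key] = max(_max_snake_seq(A, m-1, n, memo) + add_bottom,
--                         _max_snake_seq(A, m, n-1, memo) + add_right)
--     return memo[key]
-- ===== SOURCE B (Python) =====
-- # Bottom-up tabulation replacing A's memoized top-down recursion (return value only:
-- # A mutates the memo dict in place, B leaves it untouched).
-- def _max_snake_seq(A, m, n, memo):
--     if m == 0 and n == 0:
--         return 1
--     if m < 0 or n < 0:
--         return 0
--     prev = []
--     for i in range(m + 1):
--         cur = []
--         for j in range(n + 1):
--             if i == 0 and j == 0:
--                 cur.append(1)
--                 continue
--             if (i, j) in memo: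
--                 cur.append(memo[(i, j)])
--                 continue
--             add_bottom = 1 if (i - 1 > 0 and A[i][j] == A[i - 1][j] + 1) or A[i][j] == A[i - 1][j] - 1 else 0
--             add_right = 1 if (j - 1 > 0 and A[i][j] == A[i][j - 1] + 1) or A[i][j] == A[i][j - 1] - 1 else 0
--             cur.append(max((prev[j] if i > 0 else 0) + add_bottom,
--                            (cur[j - 1] if j > 0 else 0) + add_right))
--         prev = cur
--     return prev[n]
-- ===== Notes on version B (the rewrite author's own statement) =====
-- stated objective: alternative
-- what changed: Replaced A's memo-mutating top-down recursion by an iterative bottom-up row-by-row tabulation that keeps only the previous dp row and never writes to the memo (return value only; A mutates memo in place).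
-- outside the precondition, e.g. on _max_snake_seq([], 1, 1, {(1, 1): 5}): A returns 5, B raises IndexError
import Mathlib
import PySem

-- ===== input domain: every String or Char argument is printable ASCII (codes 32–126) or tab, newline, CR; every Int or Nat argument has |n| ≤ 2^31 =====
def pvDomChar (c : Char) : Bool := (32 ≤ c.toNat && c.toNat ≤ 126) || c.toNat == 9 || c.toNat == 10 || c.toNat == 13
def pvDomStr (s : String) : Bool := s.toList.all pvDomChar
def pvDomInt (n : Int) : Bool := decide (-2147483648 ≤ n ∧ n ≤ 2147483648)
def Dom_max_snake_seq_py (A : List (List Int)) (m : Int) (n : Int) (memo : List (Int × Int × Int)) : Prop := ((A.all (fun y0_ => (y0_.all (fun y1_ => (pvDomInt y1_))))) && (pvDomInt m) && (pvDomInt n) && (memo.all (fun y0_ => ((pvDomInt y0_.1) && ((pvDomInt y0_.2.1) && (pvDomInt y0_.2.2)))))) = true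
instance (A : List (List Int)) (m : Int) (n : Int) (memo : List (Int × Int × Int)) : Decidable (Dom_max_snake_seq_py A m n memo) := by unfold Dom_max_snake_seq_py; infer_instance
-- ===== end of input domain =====

-- B replaces A's memo-mutating top-down recursion by an iterative bottom-up tabulation
-- keeping one dp row (objective: alternative decomposition); equivalence is about the
-- RETURN value only — the Python A mutates its memo dict in place, B does not.

-- ===== PORT A =====
-- A[i][j] (Python indexing, possibly negative; out-of-range reads default to 0 and are excluded by Pre_)
def pvIdx (A : List (List Int)) (i j : Int) : Int :=
  PySem.List.pyGetD (PySem.List.pyGetD A i []) j 0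

-- memo lookup: first triple (a, b, v) with (a, b) = (i, j)
def pvMemoGet? (memo : List (Int × Int × Int)) (i j : Int) : Option Int :=
  (memo.find? (fun p => p.1 == i && p.2.1 == j)).map (fun p => p.2.2)

-- A's recursion, threading the mutated memo as state
def pvGoA (A : List (List Int)) (m n : Int) (memo : List (Int × Int × Int)) :
    Int × List (Int × Int × Int) :=
  if h1 : m = 0 ∧ n = 0 then (1, memo)
  else if h2 : m < 0 ∨ n < 0 then (0, memo)
  else
    match pvMemoGet? memo m n with
    | some v => (v, memo)
    | none =>
      let amn := pvIdx A m n
      let add_bottom : Int :=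
        if (m - 1 > 0 ∧ amn = pvIdx A (m - 1) n + 1) ∨ amn = pvIdx A (m - 1) n - 1 then 1 else 0
      let add_right : Int :=
        if (n - 1 > 0 ∧ amn = pvIdx A m (n - 1) + 1) ∨ amn = pvIdx A m (n - 1) - 1 then 1 else 0
      let r1 := pvGoA A (m - 1) n memo
      let r2 := pvGoA A m (n - 1) r1.2
      let v := max (r1.1 + add_bottom) (r2.1 + add_right)
      (v, r2.2 ++ [(m, n, v)])
termination_by (m + n).toNat
decreasing_by all_goals omega

def max_snake_seq_py (A : List (List Int)) (m : Int) (n : Int) (memo : List (Int × Int × Int)) : Int :=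
  (pvGoA A m n memo).1

-- ===== PORT B =====
-- one dp cell, from the previous row and the current row built so far
def pvCellB (A : List (List Int)) (memo : List (Int × Int × Int)) (i j : Int)
    (prev cur : List Int) : Int :=
  if i = 0 ∧ j = 0 then 1
  else
    match pvMemoGet? memo i j with
    | some v => v
    | none =>
      let amn := pvIdx A i j
      let add_bottom : Int :=
        if (i - 1 > 0 ∧ amn = pvIdx A (i - 1) j + 1) ∨ amn = pvIdx A (i - 1) j - 1 then 1 else 0
      let add_right : Int :=
        if (j - 1 > 0 ∧ amn = pvIdx A i (j - 1) + 1) ∨ amn = pvIdx A i (j - 1) - 1 then 1 else 0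
      max ((if i > 0 then prev.getD j.toNat 0 else 0) + add_bottom)
          ((if j > 0 then cur.getD (j.toNat - 1) 0 else 0) + add_right)

-- one dp row, built left to right
def pvRowB (A : List (List Int)) (memo : List (Int × Int × Int)) (n : Nat) (i : Int)
    (prev : List Int) : List Int :=
  (List.range (n + 1)).foldl (fun (cur : List Int) (j : Nat) => cur ++ [pvCellB A memo i (j : Int) prev cur]) []

def max_snake_seq_py_alt (A : List (List Int)) (m : Int) (n : Int) (memo : List (Int × Int × Int)) : Int :=
  if m = 0 ∧ n = 0 then 1
  else if m < 0 ∨ n < 0 then 0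
  else
    let last := (List.range (m.toNat + 1)).foldl
      (fun (prev : List Int) (i : Nat) => pvRowB A memo n.toNat (i : Int) prev) []
    last.getD n.toNat 0

-- ===== PRECONDITION & SPEC =====
-- Pre_ excludes inputs where the Python A hits an IndexError, and (stated narrowing) the
-- out-of-range grids on which A still returns only because passed-in memo entries cut off
-- the recursion before any indexing — there A's value is an artefact of the cache and B raises.
def Pre_max_snake_seq_py (A : List (List Int)) (m : Int) (n : Int) (memo : List (Int × Int × Int)) : Prop :=
  (m = 0 ∧ n = 0) ∨ m < 0 ∨ n < 0 ∨
    (m < (A.length : Int) ∧ n < ((A.getLastD []).length : Int) ∧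
      ∀ i ∈ List.range (m.toNat + 1), n < (((A.getD i []).length : Int)))
instance (A : List (List Int)) (m : Int) (n : Int) (memo : List (Int × Int × Int)) :
    Decidable (Pre_max_snake_seq_py A m n memo) := by unfold Pre_max_snake_seq_py; infer_instance

def pvWitness_max_snake_seq_py : List (List Int) × Int × Int × (List (Int × Int × Int)) :=
  ([[1, 2], [4, 3]], 1, 1, [])

def Spec_max_snake_seq_py (A : List (List Int)) (m : Int) (n : Int) (memo : List (Int × Int × Int)) (out : Int) : Prop := out = max_snake_seq_py_alt A m n memo
instance (A : List (List Int)) (m : Int) (n : Int) (memo : List (Int × Int × Int)) (out : Int) : Decidable (Spec_max_snake_seq_py A m n memo out) := by unfold Spec_max_snake_seq_py; infer_instance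

-- ===== CLAIM (what is proved, stated in full; the proofs are below) =====
def Claim_equal_max_snake_seq_py : Prop := ∀ (A : List (List Int)) (m : Int) (n : Int) (memo : List (Int × Int × Int)), Dom_max_snake_seq_py A m n memo → Pre_max_snake_seq_py A m n memo → Spec_max_snake_seq_py A m n memo (max_snake_seq_py A m n memo)

-- ===== LEMMAS AND PROOFS =====
-- the pure recurrence both programs compute (relative to the INITIAL memo)
def pvF (A : List (List Int)) (memo0 : List (Int × Int × Int)) (m n : Int) : Int :=
  if m = 0 ∧ n = 0 then 1
  else if m < 0 ∨ n < 0 then 0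
  else
    match pvMemoGet? memo0 m n with
    | some v => v
    | none =>
      let amn := pvIdx A m n
      let add_bottom : Int :=
        if (m - 1 > 0 ∧ amn = pvIdx A (m - 1) n + 1) ∨ amn = pvIdx A (m - 1) n - 1 then 1 else 0
      let add_right : Int :=
        if (n - 1 > 0 ∧ amn = pvIdx A m (n - 1) + 1) ∨ amn = pvIdx A m (n - 1) - 1 then 1 else 0
      max (pvF A memo0 (m - 1) n + add_bottom) (pvF A memo0 m (n - 1) + add_right)
termination_by (m + n).toNat
decreasing_by all_goals omega

theorem pvF_base (A : List (List Int)) (memo0 : List (Int × Int × Int)) {m n : Int}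
    (h : m = 0 ∧ n = 0) : pvF A memo0 m n = 1 := by
  unfold pvF; rw [if_pos h]

theorem pvF_neg (A : List (List Int)) (memo0 : List (Int × Int × Int)) {m n : Int}
    (h1 : ¬(m = 0 ∧ n = 0)) (h2 : m < 0 ∨ n < 0) : pvF A memo0 m n = 0 := by
  unfold pvF; rw [if_neg h1, if_pos h2]

theorem pvF_hit (A : List (List Int)) (memo0 : List (Int × Int × Int)) {m n v : Int}
    (h1 : ¬(m = 0 ∧ n = 0)) (h2 : ¬(m < 0 ∨ n < 0)) (hv : pvMemoGet? memo0 m n = some v) :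
    pvF A memo0 m n = v := by
  unfold pvF; rw [if_neg h1, if_neg h2, hv]

theorem pvF_miss (A : List (List Int)) (memo0 : List (Int × Int × Int)) {m n : Int}
    (h1 : ¬(m = 0 ∧ n = 0)) (h2 : ¬(m < 0 ∨ n < 0)) (hv : pvMemoGet? memo0 m n = none) :
    pvF A memo0 m n =
      max (pvF A memo0 (m - 1) n +
            (if (m - 1 > 0 ∧ pvIdx A m n = pvIdx A (m - 1) n + 1) ∨ pvIdx A m n = pvIdx A (m - 1) n - 1 then 1 else 0))
          (pvF A memo0 m (n - 1) +
            (if (n - 1 > 0 ∧ pvIdx A m n = pvIdx A m (n - 1) + 1) ∨ pvIdx A m n = pvIdx A m (n - 1) - 1 then 1 else 0)) := by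
  conv_lhs => rw [pvF]
  rw [if_neg h1, if_neg h2, hv]

def pvInv (A : List (List Int)) (memo0 M : List (Int × Int × Int)) : Prop :=
  ∀ i j : Int,
    (∀ v, pvMemoGet? memo0 i j = some v → pvMemoGet? M i j = some v) ∧
    (∀ v, pvMemoGet? M i j = some v → pvMemoGet? memo0 i j = some v ∨ v = pvF A memo0 i j)

theorem pvMemoGet?_append (M : List (Int × Int × Int)) (e : Int × Int × Int) (i j : Int) :
    pvMemoGet? (M ++ [e]) i j =
      match pvMemoGet? M i j with
      | some v => some v
      | none => if e.1 = i ∧ e.2.1 = j then some e.2.2 else none := by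
  unfold pvMemoGet?
  rw [List.find?_append]
  cases h : M.find? (fun p => p.1 == i && p.2.1 == j) with
  | some p => simp
  | none =>
    simp only [Option.map, Option.none_or]
    by_cases hij : e.1 = i ∧ e.2.1 = j
    · simp [List.find?, hij.1, hij.2]
    · have : (e.1 == i && e.2.1 == j) = false := by
        simp only [Bool.and_eq_false_iff, beq_eq_false_iff_ne]; tauto
      simp [List.find?, this, hij]

theorem pvGoA_hit (A : List (List Int)) {m n v : Int} {M : List (Int × Int × Int)}
    (h1 : ¬(m = 0 ∧ n = 0)) (h2 : ¬(m < 0 ∨ n < 0)) (hv : pvMemoGet? M m n = some v) :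
    pvGoA A m n M = (v, M) := by
  unfold pvGoA; rw [dif_neg h1, dif_neg h2, hv]

theorem pvGoA_miss (A : List (List Int)) {m n : Int} {M : List (Int × Int × Int)}
    (h1 : ¬(m = 0 ∧ n = 0)) (h2 : ¬(m < 0 ∨ n < 0)) (hv : pvMemoGet? M m n = none) :
    pvGoA A m n M =
      (max ((pvGoA A (m - 1) n M).1 +
            (if (m - 1 > 0 ∧ pvIdx A m n = pvIdx A (m - 1) n + 1) ∨ pvIdx A m n = pvIdx A (m - 1) n - 1 then 1 else 0))
          ((pvGoA A m (n - 1) (pvGoA A (m - 1) n M).2).1 +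
            (if (n - 1 > 0 ∧ pvIdx A m n = pvIdx A m (n - 1) + 1) ∨ pvIdx A m n = pvIdx A m (n - 1) - 1 then 1 else 0)),
       (pvGoA A m (n - 1) (pvGoA A (m - 1) n M).2).2 ++
         [(m, n, max ((pvGoA A (m - 1) n M).1 +
            (if (m - 1 > 0 ∧ pvIdx A m n = pvIdx A (m - 1) n + 1) ∨ pvIdx A m n = pvIdx A (m - 1) n - 1 then 1 else 0))
          ((pvGoA A m (n - 1) (pvGoA A (m - 1) n M).2).1 +
            (if (n - 1 > 0 ∧ pvIdx A m n = pvIdx A m (n - 1) + 1) ∨ pvIdx A m n = pvIdx A m (n - 1) - 1 then 1 else 0)))]) := by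
  conv_lhs => rw [pvGoA]
  rw [dif_neg h1, dif_neg h2, hv]

theorem pvGoA_correct (A : List (List Int)) (memo0 : List (Int × Int × Int)) :
    ∀ (m n : Int) (M : List (Int × Int × Int)), pvInv A memo0 M →
      (pvGoA A m n M).1 = pvF A memo0 m n ∧ pvInv A memo0 (pvGoA A m n M).2 := by
  intro m n M
  induction m, n, M using pvGoA.induct A with
  | case1 m n M h1 =>
    intro hInv
    unfold pvGoA; rw [dif_pos h1]
    exact ⟨(pvF_base A memo0 h1).symm, hInv⟩
  | case2 m n M h1 h2 =>
    intro hInv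
    unfold pvGoA; rw [dif_neg h1, dif_pos h2]
    exact ⟨(pvF_neg A memo0 h1 h2).symm, hInv⟩
  | case3 m n M h1 h2 v hv =>
    intro hInv
    rw [pvGoA_hit A h1 h2 hv]
    refine ⟨?_, hInv⟩
    rcases (hInv m n).2 v hv with h | h
    · exact (pvF_hit A memo0 h1 h2 h).symm
    · exact h
  | case4 m n M h1 h2 hv r1 ih1 ih2 =>
    intro hInv
    have hm0 : pvMemoGet? memo0 m n = none := by
      cases h0 : pvMemoGet? memo0 m n with
      | none => rfl
      | some w => rw [(hInv m n).1 w h0] at hv; exact absurd hv (by simp)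
    obtain ⟨e1, i1⟩ := ih1 hInv
    obtain ⟨e2x, i2x⟩ := ih2 i1
    have e2 : (pvGoA A m (n - 1) (pvGoA A (m - 1) n M).2).1 = pvF A memo0 m (n - 1) := e2x
    have i2 : pvInv A memo0 (pvGoA A m (n - 1) (pvGoA A (m - 1) n M).2).2 := i2x
    rw [pvGoA_miss A h1 h2 hv, pvF_miss A memo0 h1 h2 hm0]
    constructor
    · simp only [e1, e2]
    · intro i j
      constructor
      · intro w hw
        rw [pvMemoGet?_append]
        rw [(i2 i j).1 w hw]
      · intro w hw
        rw [pvMemoGet?_append] at hw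
        cases h3 : pvMemoGet? (pvGoA A m (n - 1) (pvGoA A (m - 1) n M).2).2 i j with
        | some u =>
          rw [h3] at hw
          simp only [Option.some.injEq] at hw
          subst hw
          exact (i2 i j).2 u h3
        | none =>
          rw [h3] at hw
          by_cases hij : m = i ∧ n = j
          · right
            simp only [hij.1, hij.2, and_self, if_pos] at hw
            simp only [Option.some.injEq] at hw
            rw [← hw, ← hij.1, ← hij.2, pvF_miss A memo0 h1 h2 hm0, e1, e2]
          · simp [hij] at hw

theorem pvCellB_correct (A : List (List Int)) (memo0 : List (Int × Int × Int)) (i j : Int)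
    (hi : 0 ≤ i) (hj : 0 ≤ j) (prev cur : List Int)
    (hprev : 0 < i → prev.getD j.toNat 0 = pvF A memo0 (i - 1) j)
    (hcur : 0 < j → cur.getD (j.toNat - 1) 0 = pvF A memo0 i (j - 1)) :
    pvCellB A memo0 i j prev cur = pvF A memo0 i j := by
  by_cases hb : i = 0 ∧ j = 0
  · unfold pvCellB; rw [if_pos hb, pvF_base A memo0 hb]
  · have h2 : ¬(i < 0 ∨ j < 0) := by omega
    unfold pvCellB
    rw [if_neg hb]
    cases hv : pvMemoGet? memo0 i j with
    | some v => rw [pvF_hit A memo0 hb h2 hv]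
    | none =>
      rw [pvF_miss A memo0 hb h2 hv]
      have hbv : (if i > 0 then prev.getD j.toNat 0 else 0) = pvF A memo0 (i - 1) j := by
        by_cases hip : i > 0
        · rw [if_pos hip, hprev hip]
        · have hi0 : i = 0 := by omega
          rw [if_neg hip, pvF_neg A memo0 (by omega) (by omega)]
      have hrv : (if j > 0 then cur.getD (j.toNat - 1) 0 else 0) = pvF A memo0 i (j - 1) := by
        by_cases hjp : j > 0
        · rw [if_pos hjp, hcur hjp]
        · have hj0 : j = 0 := by omega
          rw [if_neg hjp, pvF_neg A memo0 (by omega) (by omega)]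
      rw [hbv, hrv]

theorem pvGetD_map_range (g : Nat → Int) (k t : Nat) (ht : t < k) :
    (((List.range k).map g).getD t 0) = g t := by
  rw [List.getD_eq_getElem?_getD]
  simp [List.getElem?_map, List.getElem?_range, ht]

theorem pvRowB_correct (A : List (List Int)) (memo0 : List (Int × Int × Int)) (n : Nat)
    (i : Int) (hi : 0 ≤ i)
    (prev : List Int)
    (hprev : 0 < i → ∀ j : Nat, j < n + 1 → prev.getD j 0 = pvF A memo0 (i - 1) (j : Int)) :
    pvRowB A memo0 n i prev = (List.range (n + 1)).map (fun (j : Nat) => pvF A memo0 i (j : Int)) := by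
  unfold pvRowB
  induction n with
  | zero =>
    simp only [List.range_succ, List.range_zero, List.nil_append, List.foldl_append,
      List.foldl_cons, List.foldl_nil, List.map_cons, List.map_nil]
    push_cast
    rw [pvCellB_correct A memo0 i 0 hi le_rfl prev []
      (fun hip => by simpa using hprev hip 0 (by omega)) (fun h => absurd h (by omega))]
  | succ k ih =>
    have hrec := ih (fun hip j hj => hprev hip j (by omega))
    rw [List.range_succ, List.foldl_append, List.map_append, hrec, List.foldl_cons,
      List.foldl_nil, List.map_cons, List.map_nil]
    congr 1
    congr 1
    apply pvCellB_correct A memo0 i ((k + 1 : Nat) : Int) hi (by positivity)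
    · intro hip
      have ht : (((k + 1 : Nat) : Int)).toNat = k + 1 := by omega
      rw [ht]
      exact hprev hip (k + 1) (by omega)
    · intro _
      have h1 : (((k + 1 : Nat) : Int)).toNat - 1 = k := by omega
      have h2 : ((k + 1 : Nat) : Int) - 1 = (k : Int) := by push_cast; ring
      rw [h1, h2, pvGetD_map_range (fun (j : Nat) => pvF A memo0 i (j : Int)) (k + 1) k (by omega)]

theorem pvRows_correct (A : List (List Int)) (memo0 : List (Int × Int × Int)) (n : Nat) :
    ∀ k : Nat, (List.range (k + 1)).foldl
        (fun (prev : List Int) (i : Nat) => pvRowB A memo0 n (i : Int) prev) [] =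
      (List.range (n + 1)).map (fun (j : Nat) => pvF A memo0 (k : Int) (j : Int)) := by
  intro k
  induction k with
  | zero =>
    simp only [List.range_one, List.foldl_cons, List.foldl_nil, Nat.cast_zero]
    exact pvRowB_correct A memo0 n 0 le_rfl [] (fun h => absurd h (by omega))
  | succ k ih =>
    rw [List.range_succ, List.foldl_append, ih, List.foldl_cons, List.foldl_nil]
    have h2 : ((k + 1 : Nat) : Int) - 1 = (k : Int) := by push_cast; ring
    rw [pvRowB_correct A memo0 n ((k + 1 : Nat) : Int) (by positivity)
      ((List.range (n + 1)).map (fun (j : Nat) => pvF A memo0 (k : Int) (j : Int)))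
      (fun _ j hj => by
        rw [pvGetD_map_range (fun (j : Nat) => pvF A memo0 (k : Int) (j : Int)) (n + 1) j hj, h2])]

theorem pvAlt_eq_F (A : List (List Int)) (m n : Int) (memo : List (Int × Int × Int)) :
    max_snake_seq_py_alt A m n memo = pvF A memo m n := by
  unfold max_snake_seq_py_alt
  by_cases h1 : m = 0 ∧ n = 0
  · rw [if_pos h1, pvF_base A memo h1]
  · rw [if_neg h1]
    by_cases h2 : m < 0 ∨ n < 0
    · rw [if_pos h2, pvF_neg A memo h1 h2]
    · rw [if_neg h2]
      have hm : ((m.toNat : Nat) : Int) = m := by omega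
      have hn : ((n.toNat : Nat) : Int) = n := by omega
      rw [pvRows_correct A memo n.toNat m.toNat,
        pvGetD_map_range (fun (j : Nat) => pvF A memo (m.toNat : Int) (j : Int)) (n.toNat + 1) n.toNat (by omega),
        hm, hn]

-- ===== VERDICT (by name: the statement is the Claim_ definition above) =====
theorem max_snake_seq_py_spec : Claim_equal_max_snake_seq_py := by
  intro A m n memo _ _
  unfold Spec_max_snake_seq_py max_snake_seq_py
  rw [pvAlt_eq_F]
  exact (pvGoA_correct A memo m n memo (fun i j => ⟨fun v h => h, fun v h => Or.inl h⟩)).1
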